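-- pv_equiv track=rewrite | github.com/HaiNam-2003/pdf-to-quizz-with-ai | util/output_parse.py | createQuizzsByText
-- ===== SOURCE A (Python) =====
-- def createQuizzsByText(text):
--     quizzes = []
--     # Tìm vị trí của thẻ "start question" đầu tiên trong văn bản
--     start_pos = text.find("<start question>")
--     # Lặp qua toàn bộ văn bản để tìm và xử lý các câu hỏi
--     while start_pos != -1:
--         # Tìm vị trí của thẻ "end question" tương ứng với "start question"
--         end_pos = text.find("<end question>", start_pos)
--         # Kiểm tra xem cặp thẻ "start question" và "end question" có tồn tại không
--         if end_pos != -1: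
--             # Cắt chuỗi từ vị trí bắt đầu của "<start question>" đến vị trí kết thúc của "<end question>"
--             question_text = text[start_pos + len("<start question>"):end_pos].strip()
--             # Thêm câu hỏi vào danh sách
--             quizzes.append(question_text)
--             # Tìm vị trí của thẻ "start question" tiếp theo từ vị trí kết thúc của "end question"
--             start_pos = text.find("<start question>", end_pos)
--         else:
--             break
--     return quizzes
-- ===== SOURCE B (Python) =====
-- def createQuizzsByText(text):
--     # Single left-to-right character scan with an outside/inside state and a
--     # buffer, instead of repeated .find() cursor jumps.
--     quizzes = []
--     buf = []
--     inside = False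
--     i = 0
--     n = len(text)
--     while i < n:
--         if not inside:
--             if text.startswith("<start question>", i):
--                 inside = True
--                 buf = []
--                 i += 16
--             else:
--                 i += 1
--         else:
--             if text.startswith("<end question>", i):
--                 quizzes.append("".join(buf).strip())
--                 inside = False
--                 i += 14
--             else:
--                 buf.append(text[i])
--                 i += 1
--     return quizzes
-- ===== Notes on version B (the rewrite author's own statement) =====
-- stated objective: alternative
-- what changed: A repeatedly jumps a cursor with text.find() for start/end tags; B makes a single left-to-right pass over the characters with an explicit outside/inside state machine and a buffer, never calling find.
import Mathlib
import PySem

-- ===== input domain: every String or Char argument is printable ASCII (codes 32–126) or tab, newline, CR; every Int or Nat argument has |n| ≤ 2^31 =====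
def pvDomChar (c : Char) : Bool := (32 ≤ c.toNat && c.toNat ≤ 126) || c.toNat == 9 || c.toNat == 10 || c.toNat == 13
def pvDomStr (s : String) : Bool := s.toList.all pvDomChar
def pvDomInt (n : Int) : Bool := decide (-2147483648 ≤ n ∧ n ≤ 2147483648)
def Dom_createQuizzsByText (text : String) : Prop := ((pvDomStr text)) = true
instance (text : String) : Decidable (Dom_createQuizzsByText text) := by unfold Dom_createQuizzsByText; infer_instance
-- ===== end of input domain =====

-- B replaces A's repeated .find() cursor jumps by a single left-to-right character
-- state machine (outside/inside a question, with a buffer); equivalence of the return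
-- values is proved, no speed claim.

-- ===== PORT A =====

-- the two tag literals as char lists (both ports work on text.toList)
def pvStartTag : List Char := "<start question>".toList
def pvEndTag : List Char := "<end question>".toList

-- A's while loop: start_pos is the Int cursor; the fuel only makes the loop total
-- (start_pos strictly increases each iteration, so length+1 iterations always suffice)
def pvLoopA (cs : List Char) : Nat → Int → List String
  | 0, _ => []
  | fuel + 1, startPos =>
    if startPos = -1 then []
    else
      -- end_pos = text.find("<end question>", start_pos)
      let endPos := PySem.Chars.findFrom cs pvEndTag startPos none
      if endPos = -1 then
        []  -- break
      else
        -- question_text = text[start_pos + len("<start question>"):end_pos].strip()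
        String.ofList (PySem.Chars.strip (PySem.List.slice cs (some (startPos + 16)) (some endPos))) ::
          -- start_pos = text.find("<start question>", end_pos)
          pvLoopA cs fuel (PySem.Chars.findFrom cs pvStartTag endPos none)

def createQuizzsByText (text : String) : List String :=
  pvLoopA text.toList (text.toList.length + 1) (PySem.Str.find text "<start question>")

-- ===== PORT B =====

-- Source B's while loop: the scanning cursor i becomes the remaining suffix list;
-- `inside` and `buf` are Source B's state variables
def pvLoopB : List Char → Bool → List Char → List String
  | [], _, _ => []
  | c :: rest, inside, buf =>
    if !inside then
      if PySem.Chars.startswith (c :: rest) pvStartTag then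
        pvLoopB ((c :: rest).drop 16) true []          -- inside = True; buf = []; i += 16
      else
        pvLoopB rest false buf                          -- i += 1
    else
      if PySem.Chars.startswith (c :: rest) pvEndTag then
        -- quizzes.append("".join(buf).strip()); inside = False; i += 14
        String.ofList (PySem.Chars.strip buf) :: pvLoopB ((c :: rest).drop 14) false buf
      else
        pvLoopB rest true (buf ++ [c])                  -- buf.append(text[i]); i += 1
  termination_by l _ _ => l.length
  decreasing_by all_goals (simp only [List.length_drop, List.length_cons]; omega)

def createQuizzsByText_alt (text : String) : List String :=
  pvLoopB text.toList false []

-- ===== PRECONDITION & SPEC =====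
def Spec_createQuizzsByText (text : String) (out : List String) : Prop := out = createQuizzsByText_alt text
instance (text : String) (out : List String) : Decidable (Spec_createQuizzsByText text out) := by unfold Spec_createQuizzsByText; infer_instance

-- ===== CLAIM (what is proved, stated in full; the proofs are below) =====
def Claim_equal_createQuizzsByText : Prop := ∀ (text : String), Dom_createQuizzsByText text → Spec_createQuizzsByText text (createQuizzsByText text)

-- ===== LEMMAS AND PROOFS =====

-- find points at the first occurrence: the uniqueness direction of Chars.find_spec
theorem pv_find_eq_of_first (cs sub : List Char) (m : Nat)
    (hpre : sub <+: cs.drop m) (hmin : ∀ i < m, ¬ sub <+: cs.drop i) :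
    PySem.Chars.find cs sub = m := by
  have hin : PySem.Chars.isIn sub cs = true :=
    (PySem.Chars.exists_prefix_drop_iff_isIn sub cs).1 ⟨m, hpre⟩
  have hnn : 0 ≤ PySem.Chars.find cs sub :=
    (PySem.Chars.find_nonneg_iff cs sub).2 ((PySem.Chars.isIn_iff_infix sub cs).1 hin)
  obtain ⟨hp, hm⟩ := PySem.Chars.find_spec hnn
  by_contra hne
  rcases Nat.lt_trichotomy (PySem.Chars.find cs sub).toNat m with h | h | h
  · exact hmin _ h hp
  · omega
  · exact hm m h hpre

theorem pv_find_of_prefix (cs sub : List Char) (h : sub <+: cs) :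
    PySem.Chars.find cs sub = 0 := by
  have := pv_find_eq_of_first cs sub 0 (by simpa using h) (by omega)
  simpa using this

-- one step of the scan when there is no occurrence at the head
theorem pv_find_cons (c : Char) (rest sub : List Char) (hnp : ¬ sub <+: (c :: rest)) :
    PySem.Chars.find (c :: rest) sub =
      (if PySem.Chars.find rest sub = -1 then -1 else PySem.Chars.find rest sub + 1) := by
  split_ifs with h1
  · rw [PySem.Chars.find_eq_neg_one_iff] at h1 ⊢
    intro hinf
    rcases List.infix_cons_iff.1 hinf with h | h
    · exact hnp h
    · exact h1 h
  · have hnn : 0 ≤ PySem.Chars.find rest sub := by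
      have := PySem.Chars.neg_one_le_find (s := rest) (sub := sub)
      omega
    obtain ⟨hp, hm⟩ := PySem.Chars.find_spec hnn
    have := pv_find_eq_of_first (c :: rest) sub ((PySem.Chars.find rest sub).toNat + 1)
      (by simpa using hp)
      (by
        intro i hi
        match i with
        | 0 => simpa using hnp
        | j + 1 =>
          simp only [List.drop_succ_cons]
          exact hm j (by omega))
    omega

theorem pv_findFrom_step (cs sub : List Char) (k : Nat) (hk : k < cs.length)
    (hnp : ¬ sub <+: cs.drop k) :
    PySem.Chars.findFrom cs sub (k : Int) none
      = PySem.Chars.findFrom cs sub ((k + 1 : Nat) : Int) none := by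
  rw [PySem.Chars.findFrom_natCast cs sub k (by omega),
      PySem.Chars.findFrom_natCast cs sub (k + 1) (by omega)]
  have hdc : cs.drop k = cs[k] :: cs.drop (k + 1) := List.drop_eq_getElem_cons hk
  rw [hdc, pv_find_cons _ _ _ (by rw [← hdc]; exact hnp)]
  rcases eq_or_ne (PySem.Chars.find (cs.drop (k + 1)) sub) (-1) with h1 | h1
  · simp [h1]
  · have hge : 0 ≤ PySem.Chars.find (cs.drop (k + 1)) sub := by
      have := PySem.Chars.neg_one_le_find (s := cs.drop (k + 1)) (sub := sub)
      omega
    have h2 : PySem.Chars.find (cs.drop (k + 1)) sub + 1 ≠ -1 := by omega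
    rw [if_neg h1, if_neg h1, if_neg h2]
    push_cast
    ring

-- no occurrence of sub starts in cs[p : p+m]: find(sub, p) = find(sub, p+m)
theorem pv_findFrom_shift (cs sub : List Char) (p m : Nat) (hpm : p + m ≤ cs.length)
    (hno : ∀ t < m, ¬ sub <+: cs.drop (p + t)) :
    PySem.Chars.findFrom cs sub (p : Int) none
      = PySem.Chars.findFrom cs sub ((p + m : Nat) : Int) none := by
  induction m generalizing p with
  | zero => simp
  | succ m ih =>
    have h0 := pv_findFrom_step cs sub p (by omega) (by simpa using hno 0 (by omega))
    rw [h0, ih (p + 1) (by omega) (fun t ht => by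
      have := hno (t + 1) (by omega)
      simpa [Nat.add_assoc, Nat.add_comm 1 t] using this)]
    ring_nf

-- the end tag cannot start inside an occurrence of the start tag, and vice versa
theorem pv_noE_in_S (tl : List Char) (t : Nat) (ht : t < 16) :
    ¬ pvEndTag <+: (pvStartTag.drop t ++ tl) := by
  intro h
  have hS : pvStartTag = ['<','s','t','a','r','t',' ','q','u','e','s','t','i','o','n','>'] := by decide
  have hE : pvEndTag = ['<','e','n','d',' ','q','u','e','s','t','i','o','n','>'] := by decide
  rw [hS, hE] at h
  interval_cases t <;> simp_all [List.cons_prefix_cons]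

theorem pv_noS_in_E (tl : List Char) (t : Nat) (ht : t < 14) :
    ¬ pvStartTag <+: (pvEndTag.drop t ++ tl) := by
  intro h
  have hS : pvStartTag = ['<','s','t','a','r','t',' ','q','u','e','s','t','i','o','n','>'] := by decide
  have hE : pvEndTag = ['<','e','n','d',' ','q','u','e','s','t','i','o','n','>'] := by decide
  rw [hS, hE] at h
  interval_cases t <;> simp_all [List.cons_prefix_cons]

-- characterisation of B's outside mode by find
theorem pv_loopB_outside (cs : List Char) (buf : List Char) :
    pvLoopB cs false buf =
      (if PySem.Chars.find cs pvStartTag = -1 then []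
       else pvLoopB (cs.drop ((PySem.Chars.find cs pvStartTag).toNat + 16)) true []) := by
  induction cs generalizing buf with
  | nil =>
    rw [pvLoopB, if_pos]
    rw [PySem.Chars.find_eq_neg_one_iff]
    simp [pvStartTag]
  | cons c rest ih =>
    by_cases hp : pvStartTag <+: (c :: rest)
    · have hsw : PySem.Chars.startswith (c :: rest) pvStartTag = true :=
        (PySem.Chars.startswith_iff _ _).2 hp
      rw [pvLoopB]
      simp only [Bool.not_false, if_pos, hsw]
      rw [pv_find_of_prefix _ _ hp]
      norm_num
    · have hsw : PySem.Chars.startswith (c :: rest) pvStartTag = false := by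
        rw [← Bool.not_eq_true]
        intro hc
        exact hp ((PySem.Chars.startswith_iff _ _).1 hc)
      rw [pvLoopB]
      simp only [Bool.not_false, hsw, if_true, Bool.false_eq_true, if_false]
      rw [ih buf, pv_find_cons _ _ _ hp]
      rcases eq_or_ne (PySem.Chars.find rest pvStartTag) (-1) with h1 | h1
      · simp [h1]
      · have hge : 0 ≤ PySem.Chars.find rest pvStartTag := by
          have := PySem.Chars.neg_one_le_find (s := rest) (sub := pvStartTag)
          omega
        simp only [if_neg h1]
        rw [if_neg (by omega : PySem.Chars.find rest pvStartTag + 1 ≠ -1)]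
        have : (PySem.Chars.find rest pvStartTag + 1).toNat
            = (PySem.Chars.find rest pvStartTag).toNat + 1 := by omega
        rw [this]
        simp [List.drop_succ_cons]

-- characterisation of B's inside mode by find
theorem pv_loopB_inside (cs : List Char) (buf : List Char) :
    pvLoopB cs true buf =
      (if PySem.Chars.find cs pvEndTag = -1 then []
       else String.ofList (PySem.Chars.strip (buf ++ cs.take (PySem.Chars.find cs pvEndTag).toNat)) ::
         pvLoopB (cs.drop ((PySem.Chars.find cs pvEndTag).toNat + 14)) false []) := by
  induction cs generalizing buf with
  | nil =>
    rw [pvLoopB, if_pos]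
    rw [PySem.Chars.find_eq_neg_one_iff]
    simp [pvEndTag]
  | cons c rest ih =>
    by_cases hp : pvEndTag <+: (c :: rest)
    · have hsw : PySem.Chars.startswith (c :: rest) pvEndTag = true :=
        (PySem.Chars.startswith_iff _ _).2 hp
      rw [pvLoopB]
      simp only [Bool.not_true, Bool.false_eq_true, if_false, hsw, if_true]
      rw [pv_find_of_prefix _ _ hp]
      norm_num
      rw [pv_loopB_outside (rest.drop 13) buf, pv_loopB_outside (rest.drop 13) ([] : List Char)]
    · have hsw : PySem.Chars.startswith (c :: rest) pvEndTag = false := by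
        rw [← Bool.not_eq_true]
        intro hc
        exact hp ((PySem.Chars.startswith_iff _ _).1 hc)
      rw [pvLoopB]
      simp only [Bool.not_true, Bool.false_eq_true, if_false, hsw]
      rw [ih (buf ++ [c]), pv_find_cons _ _ _ hp]
      rcases eq_or_ne (PySem.Chars.find rest pvEndTag) (-1) with h1 | h1
      · simp [h1]
      · have hge : 0 ≤ PySem.Chars.find rest pvEndTag := by
          have := PySem.Chars.neg_one_le_find (s := rest) (sub := pvEndTag)
          omega
        simp only [if_neg h1]
        rw [if_neg (by omega : PySem.Chars.find rest pvEndTag + 1 ≠ -1)]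
        have ht : (PySem.Chars.find rest pvEndTag + 1).toNat
            = (PySem.Chars.find rest pvEndTag).toNat + 1 := by omega
        rw [ht]
        simp [List.drop_succ_cons, List.take_succ_cons]

-- the main correspondence: A's loop entered with find(S, k) equals B's scan of the k-th suffix
theorem pv_main (fuel : Nat) (cs : List Char) (k : Nat) (hk : k ≤ cs.length)
    (hfuel : cs.length - k < fuel) :
    pvLoopA cs fuel (PySem.Chars.findFrom cs pvStartTag (k : Int) none)
      = pvLoopB (cs.drop k) false [] := by
  induction fuel generalizing k with
  | zero => omega
  | succ fuel ih =>
    rw [pv_loopB_outside, PySem.Chars.findFrom_natCast cs pvStartTag k hk]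
    rcases eq_or_ne (PySem.Chars.find (cs.drop k) pvStartTag) (-1) with h1 | h1
    · rw [if_pos h1]
      simp [pvLoopA, h1]
    · have hge : 0 ≤ PySem.Chars.find (cs.drop k) pvStartTag := by
        have := PySem.Chars.neg_one_le_find (s := cs.drop k) (sub := pvStartTag)
        omega
      set fd := PySem.Chars.find (cs.drop k) pvStartTag with hfd
      set p := k + fd.toNat with hp
      obtain ⟨hpre0, _⟩ := PySem.Chars.find_spec (s := cs.drop k) (sub := pvStartTag) hge
      have hpre : pvStartTag <+: cs.drop p := by
        rw [List.drop_drop] at hpre0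
        exact hpre0
      have hSlen : pvStartTag.length = 16 := by decide
      have hlen : p + 16 ≤ cs.length := by
        have h := hpre.length_le
        rw [List.length_drop, hSlen] at h
        omega
      obtain ⟨tl, htl⟩ := hpre
      have harg : (k : Int) + fd = ((p : Nat) : Int) := by
        rw [hp]
        push_cast
        omega
      rw [if_neg h1]
      rw [pvLoopA]
      rw [if_neg (by omega : ¬ ((k : Int) + fd = -1))]
      have hshift : PySem.Chars.findFrom cs pvEndTag ((k : Int) + fd) none
          = PySem.Chars.findFrom cs pvEndTag ((p + 16 : Nat) : Int) none := by
        rw [harg]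
        exact pv_findFrom_shift cs pvEndTag p 16 hlen (by
          intro t ht
          have : cs.drop (p + t) = pvStartTag.drop t ++ tl := by
            rw [← List.drop_drop, ← htl, List.drop_append_of_le_length (by omega)]
          rw [this]
          exact pv_noE_in_S tl t ht)
      have hdropB : (cs.drop k).drop (fd.toNat + 16) = cs.drop (p + 16) := by
        rw [List.drop_drop]
        congr 1
      rw [hdropB, pv_loopB_inside]
      rw [hshift, PySem.Chars.findFrom_natCast cs pvEndTag (p + 16) hlen]
      rcases eq_or_ne (PySem.Chars.find (cs.drop (p + 16)) pvEndTag) (-1) with h2 | h2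
      · simp [h2]
      · have hgee : 0 ≤ PySem.Chars.find (cs.drop (p + 16)) pvEndTag := by
          have := PySem.Chars.neg_one_le_find (s := cs.drop (p + 16)) (sub := pvEndTag)
          omega
        set fe := PySem.Chars.find (cs.drop (p + 16)) pvEndTag with hfe
        set e := p + 16 + fe.toNat with he
        obtain ⟨hpreE0, _⟩ := PySem.Chars.find_spec (s := cs.drop (p + 16)) (sub := pvEndTag) hgee
        have hpreE : pvEndTag <+: cs.drop e := by
          rw [List.drop_drop] at hpreE0
          exact hpreE0
        have hElen : pvEndTag.length = 14 := by decide
        have hlenE : e + 14 ≤ cs.length := by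
          have h := hpreE.length_le
          rw [List.length_drop, hElen] at h
          omega
        obtain ⟨tlE, htlE⟩ := hpreE
        have hargE : ((p + 16 : Nat) : Int) + fe = ((e : Nat) : Int) := by
          push_cast
          omega
        rw [if_neg h2, if_neg (by push_cast; omega : ¬ (((p + 16 : Nat) : Int) + fe = -1))]
        have hslice : PySem.List.slice cs (some ((k : Int) + fd + 16)) (some (((p + 16 : Nat) : Int) + fe))
            = (cs.drop (p + 16)).take fe.toNat := by
          have hb1 : (k : Int) + fd + 16 = (((p + 16 : Nat) : Nat) : Int) := by push_cast; omega
          rw [hb1, hargE, PySem.List.slice_natCast]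
          congr 1
          omega
        rw [hslice]
        have hshiftS : PySem.Chars.findFrom cs pvStartTag (((p + 16 : Nat) : Int) + fe) none
            = PySem.Chars.findFrom cs pvStartTag ((e + 14 : Nat) : Int) none := by
          rw [hargE]
          exact pv_findFrom_shift cs pvStartTag e 14 hlenE (by
            intro t ht
            have : cs.drop (e + t) = pvEndTag.drop t ++ tlE := by
              rw [← List.drop_drop, ← htlE, List.drop_append_of_le_length (by omega)]
            rw [this]
            exact pv_noS_in_E tlE t ht)
        rw [hshiftS, ih (e + 14) (by omega) (by omega)]
        have hdropB2 : (cs.drop (p + 16)).drop (fe.toNat + 14) = cs.drop (e + 14) := by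
          rw [List.drop_drop]
          congr 1
        rw [hdropB2]
        simp [if_neg h1, if_neg h2]

-- ===== VERDICT (by name: the statement is the Claim_ definition above) =====
theorem createQuizzsByText_spec : Claim_equal_createQuizzsByText := by
  intro text _
  unfold Spec_createQuizzsByText createQuizzsByText createQuizzsByText_alt
  have h0 : PySem.Str.find text "<start question>"
      = PySem.Chars.findFrom text.toList pvStartTag (0 : Int) none := by
    simp [pvStartTag]
  rw [h0]
  have := pv_main (text.toList.length + 1) text.toList 0 (by omega) (by omega)
  simpa using this
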